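-- pv_equiv track=rewrite | github.com/volcengine/verl | atropos/environments/intern_bootcamp/internbootcamp_lib/internbootcamp/bootcamp/bazamonwebservices/bazamonwebservices.py | solve
-- ===== SOURCE A (Python) =====
-- def solve(s, t):
--     s_list = list(s)
--     mns = list(s_list)
--     for i in range(len(s_list)-2, -1, -1):
--         mns[i] = min(mns[i], mns[i+1])
--
--     for i in range(len(s_list)):
--         if s_list[i] != mns[i]:
--             candidates = [j for j, v in enumerate(s_list[i:], i) if v == mns[i]]
--             if candidates:
--                 j = max(candidates)
--                 s_list[i], s_list[j] = s_list[j], s_list[i]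
--                 break
--     s_opt = ''.join(s_list)
--     return s_opt if s_opt < t else '---'
-- ===== SOURCE B (Python) =====
-- def solve(s, t):
--     # One backward pass keeping the suffix minimum (char, rightmost index) as scalars;
--     # best swap pair is overwritten so the leftmost improvable position wins.
--     mn = None          # (smallest char in the scanned suffix, its rightmost index)
--     best = None        # (i, j): swap positions
--     for i, c in reversed(list(enumerate(s))):
--         if mn is not None and mn[0] < c:
--             best = (i, mn[1])
--         if mn is None or c < mn[0]:
--             mn = (c, i)
--     if best is None:
--         out = s
--     else:
--         i, j = best
--         lst = list(s)
--         lst[i], lst[j] = lst[j], lst[i]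
--         out = ''.join(lst)
--     return out if out < t else '---'
-- ===== Notes on version B (the rewrite author's own statement) =====
-- stated objective: alternative
-- what changed: Replaces A's suffix-min array plus two forward scans (search scan and candidate-index scan with max) by a single right-to-left pass that keeps only two scalars (suffix-min char with its rightmost index) and the current best swap pair, allocating no auxiliary arrays.
import Mathlib
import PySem

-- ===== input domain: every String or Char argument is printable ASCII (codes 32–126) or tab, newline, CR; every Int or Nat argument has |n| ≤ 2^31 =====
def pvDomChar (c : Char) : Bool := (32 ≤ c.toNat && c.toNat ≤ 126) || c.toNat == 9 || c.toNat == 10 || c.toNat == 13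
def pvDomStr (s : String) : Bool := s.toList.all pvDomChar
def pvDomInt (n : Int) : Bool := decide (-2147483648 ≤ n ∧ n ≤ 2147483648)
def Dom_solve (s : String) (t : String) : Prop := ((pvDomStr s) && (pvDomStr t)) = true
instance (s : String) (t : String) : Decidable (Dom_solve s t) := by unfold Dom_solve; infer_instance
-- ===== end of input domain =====

-- B replaces A's suffix-min array plus two forward scans by one right-to-left pass
-- keeping two scalars (suffix-min char / rightmost index) and the best swap pair;
-- objective: alternative (same O(n) cost, no auxiliary arrays).

-- Shared helper: the Python tuple swap 'lst[i], lst[j] = lst[j], lst[i]' (identical in both sources);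
-- indices produced by both programs are in range, the out-of-range arm is never reached.
def swapL (l : List Char) (i j : Nat) : List Char :=
  match l[i]?, l[j]? with
  | some a, some b => (l.set i b).set j a
  | _, _ => l

-- enumerate with a Nat start: exact, since every index both programs enumerate is ≥ 0.
def enumF (k : Nat) : List Char → List (Nat × Char)
  | [] => []
  | c :: l => (k, c) :: enumF (k + 1) l

-- ===== PORT A =====
-- the backward loop 'mns[i] = min(mns[i], mns[i+1])' building the suffix-minimum list
def mnsOf : List Char → List Char
  | [] => []
  | c :: l =>
    match mnsOf l with
    | [] => [c]
    | m :: ms => min c m :: m :: ms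

-- 'max([j for j, v in enumerate(suffix, k) if v == m])' (Python max of a nonneg int list)
def maxCand (k : Nat) (l : List Char) (m : Char) : Option Nat :=
  (((enumF k l).filter (fun p => p.2 == m)).map Prod.fst).max?

-- the forward scan: first i with s_list[i] != mns[i]; swap with max candidate and break
def searchA (k : Nat) : List Char → List Char → Option (Nat × Nat)
  | c :: l, m :: ms =>
    if c ≠ m then
      match maxCand k (c :: l) m with
      | some j => some (k, j)
      | none => searchA (k + 1) l ms
    else searchA (k + 1) l ms
  | _, _ => none

def solve (s : String) (t : String) : String :=
  let l := s.toList
  let lst :=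
    match searchA 0 l (mnsOf l) with
    | some (i, j) => swapL l i j
    | none => l
  if lst < t.toList then String.ofList lst else "---"

-- ===== PORT B =====
-- one right-to-left pass: state = (mn : suffix-min char with rightmost index, best : swap pair);
-- the Python loop 'for i, c in reversed(list(enumerate(s)))' is the foldr over the enumerated list
def stepB (p : Nat × Char) (st : Option (Char × Nat) × Option (Nat × Nat)) :
    Option (Char × Nat) × Option (Nat × Nat) :=
  let best :=
    match st.1 with
    | some (mc, mi) => if mc < p.2 then some (p.1, mi) else st.2
    | none => st.2
  let mn :=
    match st.1 with
    | none => some (p.2, p.1)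
    | some (mc, _) => if p.2 < mc then some (p.2, p.1) else st.1
  (mn, best)

def solve_alt (s : String) (t : String) : String :=
  let l := s.toList
  let st := (enumF 0 l).foldr stepB (none, none)
  let out :=
    match st.2 with
    | some (i, j) => swapL l i j
    | none => l
  if out < t.toList then String.ofList out else "---"

-- ===== PRECONDITION & SPEC =====
def Spec_solve (s : String) (t : String) (out : String) : Prop := out = solve_alt s t
instance (s : String) (t : String) (out : String) : Decidable (Spec_solve s t out) := by unfold Spec_solve; infer_instance

-- ===== CLAIM (what is proved, stated in full; the proofs are below) =====
def Claim_equal_solve : Prop := ∀ (s : String) (t : String), Dom_solve s t → Spec_solve s t (solve s t)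

-- ===== LEMMAS AND PROOFS =====

-- proof-side characterisations
def rminChar : List Char → Option Char
  | [] => none
  | c :: l =>
    match rminChar l with
    | none => some c
    | some m => some (min c m)

def rmaxIdx (k : Nat) (l : List Char) (m : Char) : Option Nat :=
  match l with
  | [] => none
  | c :: l =>
    match rmaxIdx (k + 1) l m with
    | some j => some j
    | none => if c = m then some k else none

def mnSpec (k : Nat) : List Char → Option (Char × Nat)
  | [] => none
  | c :: l =>
    match mnSpec (k + 1) l with
    | none => some (c, k)
    | some (mc, mi) => if c < mc then some (c, k) else some (mc, mi)

def bestSpec (k : Nat) : List Char → Option (Nat × Nat)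
  | [] => none
  | c :: l =>
    match mnSpec (k + 1) l with
    | some (mc, mi) => if mc < c then some (k, mi) else bestSpec (k + 1) l
    | none => bestSpec (k + 1) l

def aBest (k : Nat) : List Char → Option (Nat × Nat)
  | [] => none
  | c :: l =>
    match rminChar l with
    | none => none
    | some m =>
      if m < c then
        match rmaxIdx (k + 1) l m with
        | some j => some (k, j)
        | none => aBest (k + 1) l
      else aBest (k + 1) l

lemma foldr_stepB (l : List Char) : ∀ k,
    (enumF k l).foldr stepB (none, none) = (mnSpec k l, bestSpec k l) := by
  induction l with
  | nil => intro k; rfl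
  | cons c l ih =>
    intro k
    simp only [enumF, List.foldr_cons, ih (k + 1)]
    cases h : mnSpec (k + 1) l with
    | none => simp [stepB, mnSpec, bestSpec, h]
    | some p =>
      obtain ⟨mc, mi⟩ := p
      by_cases h1 : c < mc <;> by_cases h2 : mc < c <;>
        simp [stepB, mnSpec, bestSpec, h, h1, h2]

lemma rminChar_eq_nil : ∀ l : List Char, rminChar l = none ↔ l = [] := by
  intro l
  cases l with
  | nil => simp [rminChar]
  | cons c l => cases h : rminChar l <;> simp [rminChar, h]

lemma mnsOf_head : ∀ l : List Char, (mnsOf l).head? = rminChar l := by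
  intro l
  induction l with
  | nil => rfl
  | cons c l ih =>
    cases h : mnsOf l with
    | nil => rw [h] at ih; simp [mnsOf, h, rminChar, ← ih]
    | cons m ms => rw [h] at ih; simp [mnsOf, h, rminChar, ← ih]

lemma rminChar_le : ∀ (l : List Char) (m : Char), rminChar l = some m → ∀ x ∈ l, m ≤ x := by
  intro l
  induction l with
  | nil => simp [rminChar]
  | cons c l ih =>
    intro m hm x hx
    cases h : rminChar l with
    | none =>
      have hl : l = [] := (rminChar_eq_nil l).mp h
      subst hl
      simp [rminChar] at hm
      subst hm
      simp at hx
      subst hx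
      exact le_refl _
    | some m' =>
      rw [rminChar, h] at hm
      simp at hm
      subst hm
      rcases List.mem_cons.mp hx with rfl | hx'
      · exact min_le_left _ _
      · exact le_trans (min_le_right _ _) (ih m' h x hx')

lemma rmaxIdx_none : ∀ (l : List Char) (k : Nat) (c : Char), (∀ x ∈ l, x ≠ c) → rmaxIdx k l c = none := by
  intro l
  induction l with
  | nil => intros; rfl
  | cons a l ih =>
    intro k c h
    simp only [rmaxIdx]
    rw [ih (k + 1) c (fun x hx => h x (List.mem_cons_of_mem _ hx))]
    simp [h a List.mem_cons_self]

lemma rmaxIdx_isSome : ∀ (l : List Char) (k : Nat) (m : Char), rminChar l = some m → (rmaxIdx k l m).isSome := by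
  intro l
  induction l with
  | nil => simp [rminChar]
  | cons c l ih =>
    intro k m hm
    cases h : rminChar l with
    | none =>
      have hl : l = [] := (rminChar_eq_nil l).mp h
      subst hl
      simp [rminChar] at hm
      subst hm
      simp [rmaxIdx]
    | some m' =>
      rw [rminChar, h] at hm; simp at hm
      subst hm
      by_cases hcm : m' ≤ c
      · rw [min_comm, min_eq_left hcm]
        have hs := ih (k + 1) m' h
        simp only [rmaxIdx]
        cases hx : rmaxIdx (k + 1) l m' with
        | none => rw [hx] at hs; simp at hs
        | some j => simp
      · rw [min_eq_left (le_of_lt (lt_of_not_ge hcm))]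
        simp only [rmaxIdx]
        cases hx : rmaxIdx (k + 1) l c with
        | none => simp
        | some j => simp

lemma mn_eq : ∀ (l : List Char) (k : Nat),
    mnSpec k l = (rminChar l).bind (fun m => (rmaxIdx k l m).map (fun j => (m, j))) := by
  intro l
  induction l with
  | nil => intro k; rfl
  | cons c l ih =>
    intro k
    cases h : rminChar l with
    | none =>
      have hl : l = [] := (rminChar_eq_nil l).mp h
      subst hl
      simp [mnSpec, rminChar, rmaxIdx]
    | some m' =>
      have hsome := rmaxIdx_isSome l (k + 1) m' h
      cases hj : rmaxIdx (k + 1) l m' with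
      | none => rw [hj] at hsome; simp at hsome
      | some j' =>
        have hmn : mnSpec (k + 1) l = some (m', j') := by
          rw [ih (k + 1), h]; simp [hj]
        by_cases hc : c < m'
        · have hmin : min c m' = c := min_eq_left (le_of_lt hc)
          have hnot : rmaxIdx (k + 1) l c = none := by
            apply rmaxIdx_none
            intro x hx hxc
            exact absurd (rminChar_le l m' h x hx) (by rw [hxc]; exact not_le.mpr hc)
          simp only [mnSpec, hmn, rminChar, h, hmin, Option.bind_some]
          rw [if_pos hc]
          simp only [rmaxIdx, hnot]
          simp
        · have hmin : min c m' = m' := by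
            rcases lt_or_ge c m' with h1 | h1
            · exact absurd h1 hc
            · exact min_eq_right h1
          simp only [mnSpec, hmn, rminChar, h, hmin, Option.bind_some]
          rw [if_neg hc]
          simp only [rmaxIdx, hj]
          simp

lemma best_eq : ∀ (l : List Char) (k : Nat), bestSpec k l = aBest k l := by
  intro l
  induction l with
  | nil => intro k; rfl
  | cons c l ih =>
    intro k
    cases h : rminChar l with
    | none =>
      have hl : l = [] := (rminChar_eq_nil l).mp h
      subst hl
      rfl
    | some m' =>
      have hsome := rmaxIdx_isSome l (k + 1) m' h
      cases hj : rmaxIdx (k + 1) l m' with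
      | none => rw [hj] at hsome; simp at hsome
      | some j' =>
        have hmn : mnSpec (k + 1) l = some (m', j') := by
          rw [mn_eq l (k + 1), h]; simp [hj]
        by_cases hc : m' < c
        · simp only [bestSpec, hmn, aBest, h, hj]
          rw [if_pos hc, if_pos hc]
        · simp only [bestSpec, hmn, aBest, h, hj]
          rw [if_neg hc, if_neg hc]
          exact ih (k + 1)

lemma enumF_fst_ge : ∀ (l : List Char) (k : Nat) (p : Nat × Char), p ∈ enumF k l → k ≤ p.1 := by
  intro l
  induction l with
  | nil => simp [enumF]
  | cons c l ih =>
    intro k p hp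
    rcases List.mem_cons.mp hp with rfl | hp'
    · simp
    · exact le_trans (Nat.le_succ k) (ih (k + 1) p hp')

lemma maxCand_eq : ∀ (l : List Char) (k : Nat) (m : Char), maxCand k l m = rmaxIdx k l m := by
  intro l
  induction l with
  | nil => intros; rfl
  | cons c l ih =>
    intro k m
    have hrest : (((enumF (k + 1) l).filter (fun p => p.2 == m)).map Prod.fst).max? = rmaxIdx (k + 1) l m := ih (k + 1) m
    have hge : ∀ x ∈ ((enumF (k + 1) l).filter (fun p => p.2 == m)).map Prod.fst, k + 1 ≤ x := by
      intro x hx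
      rcases List.mem_map.mp hx with ⟨p, hp, rfl⟩
      exact enumF_fst_ge l (k + 1) p (List.mem_of_mem_filter hp)
    by_cases hcm : c = m
    · have hL : maxCand k (c :: l) m =
          (k :: ((enumF (k + 1) l).filter (fun p => p.2 == m)).map Prod.fst).max? := by
        simp [maxCand, enumF, hcm]
      rw [hL]
      cases hr : ((enumF (k + 1) l).filter (fun p => p.2 == m)).map Prod.fst with
      | nil =>
        rw [hr] at hrest
        simp only [rmaxIdx, ← hrest]
        simp [hcm]
      | cons r rs =>
        rw [hr] at hrest hge
        have hkr : k ≤ r := le_trans (Nat.le_succ k) (hge r List.mem_cons_self)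
        have hmax : (k :: r :: rs).max? = (r :: rs).max? := by
          rw [List.max?_cons', List.max?_cons']
          simp only [List.foldl_cons]
          rw [max_eq_right hkr]
        rw [hmax, hrest]
        simp only [rmaxIdx]
        cases hx : rmaxIdx (k + 1) l m with
        | none => rw [hx] at hrest; simp at hrest
        | some j => rfl
    · have hL : maxCand k (c :: l) m =
          (((enumF (k + 1) l).filter (fun p => p.2 == m)).map Prod.fst).max? := by
        simp [maxCand, enumF, hcm]
      rw [hL, hrest]
      simp only [rmaxIdx]
      cases hx : rmaxIdx (k + 1) l m with
      | none => simp [hcm]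
      | some j => rfl

lemma searchA_eq : ∀ (l : List Char) (k : Nat), searchA k l (mnsOf l) = aBest k l := by
  intro l
  induction l with
  | nil => intro k; rfl
  | cons c l ih =>
    intro k
    cases h : mnsOf l with
    | nil =>
      have hl : l = [] := by
        cases l with
        | nil => rfl
        | cons a l' =>
          simp only [mnsOf] at h
          cases hm : mnsOf l' <;> rw [hm] at h <;> simp at h
      subst hl
      simp [searchA, mnsOf, aBest, rminChar]
    | cons m ms =>
      have hrm : rminChar l = some m := by
        have h2 := mnsOf_head l; rw [h] at h2; simpa using h2.symm
      have hunf : mnsOf (c :: l) = min c m :: m :: ms := by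
        simp [mnsOf, h]
      have hrec : searchA (k + 1) l (m :: ms) = aBest (k + 1) l := by
        rw [← h]; exact ih (k + 1)
      rw [hunf]
      by_cases hc : m < c
      · have hmin : min c m = m := min_eq_right (le_of_lt hc)
        have hne : c ≠ min c m := by rw [hmin]; exact (ne_of_gt hc)
        have hcm : c ≠ m := by rw [← hmin]; exact hne
        simp only [searchA, maxCand_eq, hmin]
        simp only [aBest, hrm, if_pos hc]
        simp only [rmaxIdx]
        cases hx : rmaxIdx (k + 1) l m with
        | none => simp [hcm, hrec]
        | some j => simp [hcm]
      · have heq : ¬ (c ≠ min c m) := by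
          rw [min_eq_left (le_of_not_gt hc)]; simp
        simp only [searchA, if_neg heq]
        simp only [aBest, hrm, if_neg hc]
        exact hrec

-- ===== VERDICT (by name: the statement is the Claim_ definition above) =====
theorem solve_spec : Claim_equal_solve := by
  intro s t _
  unfold Spec_solve solve solve_alt
  simp only [foldr_stepB, best_eq, searchA_eq]
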